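-- pv_equiv track=rewrite | github.com/gyubin-code/Baekjoon | programmers/카모2번.py | solution
-- ===== SOURCE A (Python) =====
-- import collections
--
-- def solution(id_list, k):
--     answer = 0
--     id_dic = collections.defaultdict(int)
--     for ids in id_list:
--         id_l = set(ids.split()) # 최대 1장 없앰
--         for i in id_l:
--             if i in id_dic:
--                 id_dic[i] += 1
--             else:
--                 id_dic[i] = 1
--     for v in id_dic.values():
--         if v > k:
--             answer += k
--         else:
--             answer += v
--     return answer
-- ===== SOURCE B (Python) =====
-- def solution(id_list, k):
--     # sort-and-group instead of a hash-map counter: flatten the per-string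
--     # deduplicated tokens, sort them, then sum min(run_length, k) per run.
--     tokens = sorted(t for ids in id_list for t in set(ids.split()))
--     answer = 0
--     i = 0
--     n = len(tokens)
--     while i < n:
--         j = i
--         while j < n and tokens[j] == tokens[i]:
--             j += 1
--         answer += min(j - i, k)
--         i = j
--     return answer
-- ===== Notes on version B (the rewrite author's own statement) =====
-- stated objective: alternative
-- what changed: Replaces A's defaultdict counting pass plus values() pass by flattening the per-string deduplicated tokens into one list, sorting it, and summing min(run_length, k) over equal-token runs in a single scan.
import Mathlib
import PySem

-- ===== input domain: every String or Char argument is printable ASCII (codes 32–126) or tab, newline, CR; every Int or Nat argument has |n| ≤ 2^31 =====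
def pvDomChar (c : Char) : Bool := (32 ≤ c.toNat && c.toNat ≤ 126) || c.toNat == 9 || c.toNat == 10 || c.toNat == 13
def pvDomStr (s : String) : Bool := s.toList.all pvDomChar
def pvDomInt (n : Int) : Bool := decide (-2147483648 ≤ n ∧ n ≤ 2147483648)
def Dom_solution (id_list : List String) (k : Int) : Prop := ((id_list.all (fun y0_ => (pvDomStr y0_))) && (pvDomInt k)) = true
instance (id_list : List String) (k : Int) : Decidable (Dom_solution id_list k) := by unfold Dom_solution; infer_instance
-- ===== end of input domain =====

-- B replaces A's hash-map counting by flatten + sort + one run-length scan (alternative algorithm, same result).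

-- ===== PORT A =====
def solution (id_list : List String) (k : Int) : Int :=
  let id_dic := id_list.foldl (fun d ids =>
      (PySem.Set.ofList (PySem.Str.split₀ ids)).foldl
        (fun d i => if d.contains i then d.modify i 0 (fun v => v + 1) else d.insert i 1) d)
    PySem.Dict.empty
  id_dic.values.foldl (fun answer v => if v > k then answer + k else answer + v) 0

-- ===== PORT B =====
-- the while-loop pair of Source B: consume one run (takeWhile/dropWhile = the inner 'while tokens[j]==tokens[i]')
def groupSum (k : Int) : List String → Int
  | [] => 0
  | t :: rest =>
      min ((1 : Int) + (rest.takeWhile (fun x => x == t)).length) k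
        + groupSum k (rest.dropWhile (fun x => x == t))
termination_by ys => ys.length
decreasing_by simpa using Nat.lt_succ_of_le (List.length_dropWhile_le _ _)

def solution_alt (id_list : List String) (k : Int) : Int :=
  let tokens := PySem.List.sorted
    (id_list.flatMap (fun ids => PySem.Set.ofList (PySem.Str.split₀ ids))) (fun x => x) false
  groupSum k tokens

-- ===== PRECONDITION & SPEC =====
def Spec_solution (id_list : List String) (k : Int) (out : Int) : Prop := out = solution_alt id_list k
instance (id_list : List String) (k : Int) (out : Int) : Decidable (Spec_solution id_list k out) := by unfold Spec_solution; infer_instance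

-- ===== CLAIM (what is proved, stated in full; the proofs are below) =====
def Claim_equal_solution : Prop := ∀ (id_list : List String) (k : Int), Dom_solution id_list k → Spec_solution id_list k (solution id_list k)

-- ===== LEMMAS AND PROOFS =====

theorem modify_eq_insert_of_not_contains (d : PySem.Dict String Int) (i : String)
    (h : d.contains i = false) : d.modify i 0 (fun v => v + 1) = d.insert i 1 := by
  simp [PySem.Dict.modify, PySem.Dict.insert, h,
    PySem.Dict.getD_of_not_contains (d := d) (h := h)]

theorem A_step_eq (d : PySem.Dict String Int) (i : String) :
    (if d.contains i then d.modify i 0 (fun v => v + 1) else d.insert i 1)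
      = d.modify i 0 (fun v => v + 1) := by
  by_cases h : d.contains i = true
  · simp [h]
  · simp only [Bool.not_eq_true] at h
    simp [h, modify_eq_insert_of_not_contains d i h]

-- the common value: sum over the distinct tokens of min(count, k)
theorem sum_map_nodup_eq_finset (l : List String) (f : String → Int) (h : l.Nodup) :
    (l.map f).sum = ∑ x ∈ l.toFinset, f x := (List.sum_toFinset f h).symm

theorem A_eq_finset (id_list : List String) (k : Int) :
    solution id_list k =
      ∑ x ∈ (id_list.flatMap (fun ids => PySem.Set.ofList (PySem.Str.split₀ ids))).toFinset,
        min (((id_list.flatMap (fun ids => PySem.Set.ofList (PySem.Str.split₀ ids))).count x : Int)) k := by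
  set xs := id_list.flatMap (fun ids => PySem.Set.ofList (PySem.Str.split₀ ids)) with hxs
  unfold solution
  simp only [A_step_eq]
  rw [show (id_list.foldl (fun d ids =>
      (PySem.Set.ofList (PySem.Str.split₀ ids)).foldl
        (fun d i => d.modify i 0 (fun v => v + 1)) d) PySem.Dict.empty) = PySem.Dict.counter xs by
    rw [hxs, ← List.foldl_flatMap]; rfl]
  have hvals : (PySem.Dict.counter xs).values
      = (PySem.Set.ofList xs).map (fun t => (xs.count t : Int)) := by
    simp [PySem.Dict.values, PySem.Dict.items_counter, List.map_map, Function.comp]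
  rw [hvals]
  have hstep : ∀ (a v : Int), (if v > k then a + k else a + v) = a + min v k := by
    intro a v; by_cases h : v > k <;> simp [h] <;> omega
  simp only [hstep]
  rw [PySem.List.foldl_add (g := fun v : Int => min v k)]
  rw [List.map_map]
  rw [sum_map_nodup_eq_finset _ _ (PySem.Set.nodup_ofList xs)]
  rw [show (PySem.Set.ofList xs).toFinset = xs.toFinset by
    apply Finset.ext; intro a; simp [List.mem_toFinset, PySem.Set.mem_ofList]]
  simp [Function.comp]

theorem groupSum_eq (k : Int) (ys : List String) :
    ys.Pairwise (· ≤ ·) →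
    groupSum k ys = ∑ x ∈ ys.toFinset, min ((ys.count x : Int)) k := by
  induction ys using groupSum.induct with
  | case1 => intro _; simp [groupSum]
  | case2 t rest ih =>
    intro h
    have hle : ∀ x ∈ rest, t ≤ x := (List.pairwise_cons.mp h).1
    have hrest : rest.Pairwise (· ≤ ·) := (List.pairwise_cons.mp h).2
    have hw : ∀ x ∈ rest.takeWhile (fun x => x == t), x = t := by
      intro x hx
      have hb : (x == t) = true := List.mem_takeWhile_imp (p := fun y => y == t) hx
      exact eq_of_beq hb
    have hd : rest.dropWhile (fun x => x == t) |>.Pairwise (· ≤ ·) :=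
      hrest.sublist (List.dropWhile_sublist _)
    have htd : t ∉ rest.dropWhile (fun x => x == t) := by
      intro hmem
      cases hdd : rest.dropWhile (fun x => x == t) with
      | nil => simp [hdd] at hmem
      | cons h0 tl =>
        have hne : ¬ (h0 == t) = true := by
          have hthis := List.head_dropWhile_not (fun x => x == t) (l := rest) (by simp [hdd])
          rw [show (rest.dropWhile (fun x => x == t)).head (by simp [hdd]) = h0 from by
            simp [hdd]] at hthis
          simp [hthis]
        have h0t : t < h0 := by
          have hmem0 : h0 ∈ rest :=
            (List.dropWhile_sublist _).mem (l₁ := rest.dropWhile (fun x => x == t)) (by simp [hdd])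
          rcases lt_or_eq_of_le (hle h0 hmem0) with h1 | h1
          · exact h1
          · exact absurd (by simp [h1]) hne
        rw [hdd] at hmem
        rcases List.mem_cons.mp hmem with h1 | h1
        · exact absurd (by simp [h1]) hne
        · have : h0 ≤ t := by
            have := (List.pairwise_cons.mp (hdd ▸ hd)).1
            exact this t h1
          exact absurd (lt_of_lt_of_le h0t this) (lt_irrefl t)
    rw [groupSum, ih hd]
    -- counts
    have hsplit : rest.takeWhile (fun x => x == t) ++ rest.dropWhile (fun x => x == t) = rest :=
      List.takeWhile_append_dropWhile
    have h1 : (rest.takeWhile (fun x => x == t)).count t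
        = (rest.takeWhile (fun x => x == t)).length :=
      List.count_eq_length.mpr (fun x hx => (hw x hx).symm)
    have h2 : (rest.dropWhile (fun x => x == t)).count t = 0 :=
      List.count_eq_zero.mpr htd
    have hc : (rest.takeWhile (fun x => x == t)).count t
        + (rest.dropWhile (fun x => x == t)).count t = rest.count t := by
      rw [← List.count_append, hsplit]
    have hcount_t : (t :: rest).count t
        = 1 + (rest.takeWhile (fun x => x == t)).length := by
      rw [List.count_cons_self]; omega
    have hcount_ne : ∀ u, u ≠ t →
        (t :: rest).count u = (rest.dropWhile (fun x => x == t)).count u := by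
      intro u hu
      have hcu : (rest.takeWhile (fun x => x == t)).count u
          + (rest.dropWhile (fun x => x == t)).count u = rest.count u := by
        rw [← List.count_append, hsplit]
      have h0 : (rest.takeWhile (fun x => x == t)).count u = 0 :=
        List.count_eq_zero.mpr (fun hmem => hu (hw u hmem))
      rw [List.count_cons_of_ne (Ne.symm hu)]
      omega
    have hfin : (t :: rest).toFinset
        = insert t (rest.dropWhile (fun x => x == t)).toFinset := by
      apply Finset.ext; intro a
      simp only [List.mem_toFinset, List.mem_cons, Finset.mem_insert]
      constructor
      · rintro (h1 | h1)
        · exact Or.inl h1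
        · rw [← hsplit] at h1
          rcases List.mem_append.mp h1 with h2 | h2
          · exact Or.inl (hw a h2)
          · exact Or.inr (by simpa using h2)
      · rintro (h1 | h1)
        · exact Or.inl h1
        · exact Or.inr ((List.dropWhile_sublist _).mem (by simpa using h1))
    rw [hfin, Finset.sum_insert (by simp [List.mem_toFinset, htd])]
    rw [hcount_t]
    push_cast
    congr 1
    apply Finset.sum_congr rfl
    intro x hx
    have hxt : x ≠ t := by
      intro he; rw [he] at hx; exact htd (List.mem_toFinset.mp hx)
    rw [hcount_ne x hxt]

theorem B_eq_finset (id_list : List String) (k : Int) :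
    solution_alt id_list k =
      ∑ x ∈ (id_list.flatMap (fun ids => PySem.Set.ofList (PySem.Str.split₀ ids))).toFinset,
        min (((id_list.flatMap (fun ids => PySem.Set.ofList (PySem.Str.split₀ ids))).count x : Int)) k := by
  set xs := id_list.flatMap (fun ids => PySem.Set.ofList (PySem.Str.split₀ ids)) with hxs
  unfold solution_alt
  rw [← hxs]
  have hperm : (PySem.List.sorted xs (fun x => x) false).Perm xs := PySem.List.sorted_perm ..
  rw [groupSum_eq k _ (by simpa using PySem.List.sorted_pairwise xs (fun x => x))]
  rw [show (PySem.List.sorted xs (fun x => x) false).toFinset = xs.toFinset by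
    apply Finset.ext; intro a; simp [List.mem_toFinset, hperm.mem_iff]]
  apply Finset.sum_congr rfl
  intro x _
  rw [hperm.count_eq]

-- ===== VERDICT (by name: the statement is the Claim_ definition above) =====
theorem solution_spec : Claim_equal_solution := by
  intro id_list k _
  unfold Spec_solution
  rw [A_eq_finset, B_eq_finset]
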